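-- pv_equiv track=rewrite | github.com/Naomi0500/IA_Ejercicios | funciones.py | calcular_suma
-- ===== SOURCE A (Python) =====
-- def calcular_suma(lista, limite):
--     """Calcula cuántos números sumar para acercarse al límite sin pasarse."""
--     suma_acumulada = 0
--     contador_numeros = 0
--
--     for numero in lista:
--         if suma_acumulada + numero >= limite:
--             break
--         suma_acumulada += numero
--         contador_numeros += 1
--
--     return contador_numeros, suma_acumulada
-- ===== SOURCE B (Python) =====
-- def calcular_suma(lista, limite):
--     """Calcula cuántos números sumar para acercarse al límite sin pasarse."""
--     # Pass 1: build the full prefix-sum table.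
--     sumas = []
--     total = 0
--     for n in lista:
--         total += n
--         sumas.append(total)
--     # Pass 2: find the first prefix sum that reaches the limit.
--     for i, s in enumerate(sumas):
--         if s >= limite:
--             return i, (sumas[i - 1] if i > 0 else 0)
--     return len(lista), (sumas[-1] if sumas else 0)
-- ===== Notes on version B (the rewrite author's own statement) =====
-- stated objective: alternative
-- what changed: B replaces A's single running-sum loop with an early break by two passes: it first builds the full prefix-sum table and then searches it for the first entry reaching the limit, reading the accumulated sum back out of the table.
import Mathlib
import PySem

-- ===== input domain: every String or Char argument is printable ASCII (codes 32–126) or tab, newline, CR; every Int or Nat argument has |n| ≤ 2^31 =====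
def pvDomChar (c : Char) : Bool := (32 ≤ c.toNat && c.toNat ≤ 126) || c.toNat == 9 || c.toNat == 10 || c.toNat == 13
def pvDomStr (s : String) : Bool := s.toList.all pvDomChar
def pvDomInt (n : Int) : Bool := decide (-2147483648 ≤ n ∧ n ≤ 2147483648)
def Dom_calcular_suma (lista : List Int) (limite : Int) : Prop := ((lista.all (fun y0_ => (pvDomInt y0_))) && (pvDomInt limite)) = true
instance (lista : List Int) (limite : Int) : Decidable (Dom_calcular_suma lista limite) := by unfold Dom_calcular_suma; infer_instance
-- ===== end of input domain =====

-- B builds the full prefix-sum table in one pass and then searches it for the first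
-- entry reaching the limit, instead of A's single running-sum loop with an early break
-- (objective: alternative decomposition, same cost).


-- ===== PORT A =====
-- A's for-loop with break, as structural recursion over the same state (suma, contador).
def pvALoop (xs : List Int) (limite suma cont : Int) : Int × Int :=
  match xs with
  | [] => (cont, suma)
  | n :: r =>
    if limite ≤ suma + n then (cont, suma)
    else pvALoop r limite (suma + n) (cont + 1)

def calcular_suma (lista : List Int) (limite : Int) : Int × Int :=
  pvALoop lista limite 0 0

-- ===== PORT B =====
-- Source B pass 1: build the prefix-sum table `sumas`.
def pvAcc (xs : List Int) (total : Int) : List Int :=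
  match xs with
  | [] => []
  | n :: r => (total + n) :: pvAcc r (total + n)

-- Source B pass 2: `for i, s in enumerate(sumas): if s >= limite: return i, sumas[i-1] …`
def pvBGo (full rest : List Int) (i limite n : Int) : Int × Int :=
  match rest with
  | [] =>
    if full.isEmpty then (n, 0)
    else (n, (PySem.List.pyGet? full (-1)).getD 0)
  | s :: r =>
    if limite ≤ s then
      (i, if 0 < i then (PySem.List.pyGet? full (i - 1)).getD 0 else 0)
    else pvBGo full r (i + 1) limite n

def calcular_suma_alt (lista : List Int) (limite : Int) : Int × Int :=
  let sumas := pvAcc lista 0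
  pvBGo sumas sumas 0 limite (lista.length : Int)

-- ===== PRECONDITION & SPEC =====
def Spec_calcular_suma (lista : List Int) (limite : Int) (out : Int × Int) : Prop := out = calcular_suma_alt lista limite
instance (lista : List Int) (limite : Int) (out : Int × Int) : Decidable (Spec_calcular_suma lista limite out) := by unfold Spec_calcular_suma; infer_instance

-- ===== CLAIM (what is proved, stated in full; the proofs are below) =====
def Claim_equal_calcular_suma : Prop := ∀ (lista : List Int) (limite : Int), Dom_calcular_suma lista limite → Spec_calcular_suma lista limite (calcular_suma lista limite)

-- ===== LEMMAS AND PROOFS =====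

lemma pvAcc_length (xs : List Int) : ∀ run, (pvAcc xs run).length = xs.length := by
  induction xs with
  | nil => intro run; simp [pvAcc]
  | cons n r ih => intro run; simp [pvAcc, ih]

-- Loop invariant: `pre` is the table of the prefix sums already consumed, `run` its
-- last entry (0 if none); then A's remaining loop equals B's remaining search.
lemma pv_key (xs : List Int) : ∀ (pre : List Int) (run limite : Int),
    pre.getLastD 0 = run →
    pvALoop xs limite run (pre.length : Int) =
      pvBGo (pre ++ pvAcc xs run) (pvAcc xs run) (pre.length : Int) limite
        ((pre ++ pvAcc xs run).length : Int) := by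
  induction xs with
  | nil =>
    intro pre run limite hlast
    simp only [pvAcc, pvALoop, pvBGo, List.append_nil]
    cases pre with
    | nil => simp_all [List.getLastD]
    | cons p ps =>
      simp [List.isEmpty_cons, PySem.List.pyGet?_neg_one, ← hlast,
        List.getLastD_eq_getLast?]
  | cons n r ih =>
    intro pre run limite hlast
    simp only [pvAcc, pvALoop, pvBGo]
    by_cases h : limite ≤ run + n
    · simp only [if_pos h]
      by_cases hpre : pre = []
      · subst hpre; simp at hlast; simp [hlast]
      · have hlen : 0 < pre.length := List.length_pos_iff.mpr hpre
        rw [if_pos (by exact_mod_cast hlen)]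
        have hcast : ((pre.length : Int) - 1) = ((pre.length - 1 : Nat) : Int) := by
          omega
        rw [hcast, PySem.List.pyGet?_natCast]
        rw [List.getElem?_append_left (by omega)]
        rw [← List.getLast?_eq_getElem?]
        simp [← hlast, List.getLastD_eq_getLast?]
    · simp only [if_neg h]
      have := ih (pre ++ [run + n]) (run + n) limite (by simp)
      simpa [List.append_assoc, add_comm] using this

-- ===== VERDICT (by name: the statement is the Claim_ definition above) =====
theorem calcular_suma_spec : Claim_equal_calcular_suma := by
  intro lista limite _
  show calcular_suma lista limite = calcular_suma_alt lista limite
  have := pv_key lista [] 0 limite (by simp)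
  simpa [calcular_suma, calcular_suma_alt, pvAcc_length] using this
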